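-- pv_equiv track=rewrite | github.com/kh277/BOJ | 백준/Gold/27172. 수 나누기 게임/수 나누기 게임.py | solve
-- ===== SOURCE A (Python) =====
-- def solve(N: int, num: list) -> list:
--     # 수가 겹치지 않으므로 속도가 빠른 set 사용
--     set_num = set(num)
--     max_data = max(set_num)
--     score = [0 for i in range(max_data+1)]
--
--     # 모든 플레이어가 가진 수에 대해서 반복
--     for i in set_num:
--         # 현재 탐색하고자 하는 플레이어가 가진 수의 배수 숫자에 연산 적용
--         for j in range(i*2, max_data+1, i):
--             if j in set_num:
--                 score[i] += 1
--                 score[j] -= 1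
--
--     # set(set_num)는 순서가 없으므로 set로 변경하기 이전 자료(num) 사용
--     return [score[i] for i in num]
-- ===== SOURCE B (Python) =====
-- def solve(N: int, num: list) -> list:
--     # Direct per-value formula instead of A's multiples sieve: each positive value v
--     # scores (#multiples of v present) - (#proper divisors of v present), written once.
--     s = set(num)
--     m = max(s)
--     score = [0] * (m + 1)
--     for v in s:
--         if v >= 1:
--             plus = sum(1 for y in s if y > v and y % v == 0)
--             minus = sum(1 for d in s if 1 <= d < v and v % d == 0)
--             score[v] = plus - minus
--     return [score[i] for i in num]
-- ===== Notes on version B (the rewrite author's own statement) =====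
-- stated objective: alternative
-- what changed: A sieves: iterating over each value it bumps a shared score array along the value's multiples (score[i]+=1 / score[j]-=1); B instead computes each positive value's score once by a direct formula - (number of its multiples present in the set) minus (number of its proper divisors present) - scanning the set per value, with no incremental bumping.
import Mathlib
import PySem

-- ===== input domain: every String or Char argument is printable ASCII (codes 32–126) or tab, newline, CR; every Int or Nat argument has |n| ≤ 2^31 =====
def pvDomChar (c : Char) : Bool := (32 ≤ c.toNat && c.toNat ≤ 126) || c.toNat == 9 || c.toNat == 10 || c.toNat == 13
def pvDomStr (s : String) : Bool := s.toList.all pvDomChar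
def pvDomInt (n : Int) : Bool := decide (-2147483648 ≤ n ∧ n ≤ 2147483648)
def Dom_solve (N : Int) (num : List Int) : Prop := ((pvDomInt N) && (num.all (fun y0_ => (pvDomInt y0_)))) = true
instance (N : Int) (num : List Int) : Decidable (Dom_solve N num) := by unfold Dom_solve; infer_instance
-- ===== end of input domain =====

-- A sieves over each value's multiples, bumping a shared score array; B computes each
-- positive value's score once by the direct formula (#multiples present) − (#proper
-- divisors present).  Same return value; neither version mutates its arguments.
-- Both Pythons iterate over a set only to accumulate order-independent updates to
-- distinct cells, so the result does not depend on the (unmodelled) set iteration order.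

-- ===== PORT A =====
def solve (N : Int) (num : List Int) : List Int :=
  let setNum : PySem.Set Int := PySem.Set.ofList num
  -- max(set_num): Python raises ValueError on an empty list — excluded by Pre_solve
  let maxData : Int := (PySem.List.max? setNum (fun x => x)).getD 0
  let score0 : List Int := (PySem.List.pyRange 0 (maxData + 1) 1).map (fun _ => (0 : Int))
  let score : List Int := setNum.foldl (fun sc i =>
    (PySem.List.pyRange (i * 2) (maxData + 1) i).foldl (fun sc j =>
      if PySem.Set.contains setNum j then
        let sc1 := PySem.List.pySetD sc i (PySem.List.pyGetD sc i 0 + 1)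
        PySem.List.pySetD sc1 j (PySem.List.pyGetD sc1 j 0 - 1)
      else sc) sc) score0
  -- [score[i] for i in num]: every read is in range inside Pre_solve
  num.map (fun i => PySem.List.pyGetD score i 0)

-- ===== PORT B =====
-- sum(1 for y in s if y > v and y % v == 0)
def pvPlus (S : List Int) (v : Int) : Int :=
  ((S.filter (fun y => decide (v < y) && (PySem.Int.mod y v == 0))).length : Int)
-- sum(1 for d in s if 1 <= d < v and v % d == 0)
def pvMinus (S : List Int) (v : Int) : Int :=
  ((S.filter (fun d => decide (1 ≤ d) && decide (d < v) && (PySem.Int.mod v d == 0))).length : Int)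

def solve_alt (N : Int) (num : List Int) : List Int :=
  let s : PySem.Set Int := PySem.Set.ofList num
  let m : Int := (PySem.List.max? s (fun x => x)).getD 0
  -- [0] * (m + 1)
  let score0 : List Int := List.replicate (m + 1).toNat 0
  let score : List Int := s.foldl (fun sc v =>
    if 1 ≤ v then PySem.List.pySetD sc v (pvPlus s v - pvMinus s v) else sc) score0
  num.map (fun i => PySem.List.pyGetD score i 0)

-- ===== PRECONDITION & SPEC =====
-- Pre_solve holds exactly where the Python A returns normally: a nonempty list (max([]) raises
-- ValueError), no zero (range step 0 raises ValueError), some element ≥ 1 (else the score list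
-- is empty and the final read raises IndexError), and every element ≥ -(max+1) (else the final
-- negative-index read raises IndexError).  No input on which A returns a value is excluded.
def Pre_solve (N : Int) (num : List Int) : Prop :=
  num ≠ [] ∧ (∃ y ∈ num, 1 ≤ y) ∧ ∀ x ∈ num, x ≠ 0 ∧ -(num.foldl max 0 + 1) ≤ x
instance (N : Int) (num : List Int) : Decidable (Pre_solve N num) := by unfold Pre_solve; infer_instance
def pvWitness_solve : Int × List Int := (4, [1, 2, 4, -1])

def Spec_solve (N : Int) (num : List Int) (out : List Int) : Prop := out = solve_alt N num
instance (N : Int) (num : List Int) (out : List Int) : Decidable (Spec_solve N num out) := by unfold Spec_solve; infer_instance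

-- ===== CLAIM (what is proved, stated in full; the proofs are below) =====
def Claim_equal_solve : Prop := ∀ (N : Int) (num : List Int), Dom_solve N num → Pre_solve N num → Spec_solve N num (solve N num)
-- ===== LEMMAS AND PROOFS =====

theorem pvGetD_of_nonneg (l : List Int) (i : Int) (d : Int) (h : 0 ≤ i) :
    PySem.List.pyGetD l i d = l.getD i.toNat d := by
  simp [PySem.List.pyGetD, PySem.List.pyGet?_of_nonneg l h, List.getD]

-- score[i] += v as one operation
def pvBump (l : List Int) (i : Int) (v : Int) : List Int :=
  PySem.List.pySetD l i (PySem.List.pyGetD l i 0 + v)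

-- the body A's inner loop executes for an accepted pair (divisor, multiple)
def pvPairOp (l : List Int) (p : Int × Int) : List Int := pvBump (pvBump l p.1 1) p.2 (-1)

-- the pair list A's double loop walks
def pvPairsA (S : List Int) (m : Int) : List (Int × Int) :=
  S.flatMap (fun i => ((PySem.List.pyRange (i * 2) (m + 1) i).filter
    (fun j => PySem.Set.contains S j)).map (fun j => (i, j)))

theorem pvFoldA (S : List Int) (m : Int) (init : List Int) :
    S.foldl (fun sc i =>
      (PySem.List.pyRange (i * 2) (m + 1) i).foldl (fun sc j =>
        if PySem.Set.contains S j then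
          let sc1 := PySem.List.pySetD sc i (PySem.List.pyGetD sc i 0 + 1)
          PySem.List.pySetD sc1 j (PySem.List.pyGetD sc1 j 0 - 1)
        else sc) sc) init = (pvPairsA S m).foldl pvPairOp init := by
  rw [pvPairsA, List.foldl_flatMap]
  congr 1
  funext sc i
  rw [List.foldl_map, List.foldl_filter]
  simp [pvPairOp, pvBump, sub_eq_add_neg]

theorem pvRange_neg_nil (a b s : Int) (hs : s < 0) (hab : a < b) :
    PySem.List.pyRange a b s = [] := by
  simp [PySem.List.pyRange, show ¬ s = 0 by omega, show ¬ 0 < s by omega, show ¬ b < a by omega]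

theorem pvRange_nodup (a b s : Int) : (PySem.List.pyRange a b s).Nodup := by
  by_cases hs : s = 0
  · simp [PySem.List.pyRange, hs]
  · rw [PySem.List.pyRange, if_neg hs]
    refine (List.nodup_range).map ?_
    intro k1 k2 h
    have h2 := mul_left_cancel₀ hs (add_left_cancel h)
    exact_mod_cast h2

theorem pvPairsA_mem (S : List Int) (m : Int) (h0 : (0:Int) ∉ S) (hm1 : 1 ≤ m) (p : Int × Int) :
    p ∈ pvPairsA S m ↔ p.1 ∈ S ∧ p.2 ∈ S ∧ 1 ≤ p.1 ∧ p.1 * 2 ≤ p.2 ∧ p.2 ≤ m ∧ p.1 ∣ p.2 := by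
  simp only [pvPairsA, List.mem_flatMap, List.mem_map, List.mem_filter]
  constructor
  · rintro ⟨i, hiS, j, ⟨hjr, hjS⟩, rfl⟩
    rcases lt_trichotomy i 0 with hi | hi | hi
    · rw [pvRange_neg_nil _ _ _ hi (by omega)] at hjr; simp at hjr
    · exact absurd (hi ▸ hiS) h0
    · rw [PySem.List.mem_pyRange_iff_of_pos hi] at hjr
      obtain ⟨h1, h2, h3⟩ := hjr
      refine ⟨hiS, (PySem.Set.contains_iff _ _).mp hjS, by omega, by omega, by omega, ?_⟩
      have : i ∣ (j - i * 2) + i * 2 := dvd_add h3 ⟨2, rfl⟩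
      simpa using this
  · rintro ⟨h1, h2, h3, h4, h5, h6⟩
    refine ⟨p.1, h1, p.2, ⟨?_, (PySem.Set.contains_iff _ _).mpr h2⟩, rfl⟩
    rw [PySem.List.mem_pyRange_iff_of_pos (by omega)]
    exact ⟨by omega, by omega, dvd_sub h6 ⟨2, rfl⟩⟩

-- single bump: length and pointwise effect
theorem pvBump_length (l : List Int) (i v : Int) (h : 0 ≤ i) :
    (pvBump l i v).length = l.length := by
  simp [pvBump, PySem.List.pySetD_of_nonneg _ _ h]

theorem pvBump_getD (l : List Int) (i v : Int) (k : Nat) (hi : 0 ≤ i)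
    (hilen : i < (l.length : Int)) :
    (pvBump l i v).getD k 0 = l.getD k 0 + (if i = (k : Int) then v else 0) := by
  rw [pvBump, PySem.List.pySetD_of_nonneg _ _ hi, pvGetD_of_nonneg _ _ _ hi]
  by_cases hk : i = (k : Int)
  · have hk' : i.toNat = k := by omega
    have hlt : k < l.length := by omega
    rw [if_pos hk, hk']
    simp [List.getD_eq_getElem?_getD, hlt]
  · have : i.toNat ≠ k := by omega
    simp [hk, List.getD_eq_getElem?_getD, this]

theorem pvPairOp_length (l : List Int) (p : Int × Int) (h1 : 0 ≤ p.1) (h2 : 0 ≤ p.2) :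
    (pvPairOp l p).length = l.length := by
  rw [pvPairOp, pvBump_length _ _ _ h2, pvBump_length _ _ _ h1]

theorem pvPairOp_getD (l : List Int) (p : Int × Int) (k : Nat) (h1 : 0 ≤ p.1) (h2 : 0 ≤ p.2)
    (h1l : p.1 < (l.length : Int)) (h2l : p.2 < (l.length : Int)) :
    (pvPairOp l p).getD k 0
      = l.getD k 0 + (if p.1 = (k : Int) then 1 else 0) - (if p.2 = (k : Int) then 1 else 0) := by
  rw [pvPairOp, pvBump_getD _ _ _ _ h2 (by rw [pvBump_length _ _ _ h1]; exact h2l),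
    pvBump_getD _ _ _ _ h1 h1l]
  split_ifs <;> omega

-- the pair fold, pointwise: each cell ends at (initial + #pairs crediting it − #pairs debiting it)
theorem pvFold_getD (L : List (Int × Int)) (init : List Int)
    (hL : ∀ p ∈ L, 0 ≤ p.1 ∧ p.1 < (init.length : Int) ∧ 0 ≤ p.2 ∧ p.2 < (init.length : Int))
    (k : Nat) :
    (L.foldl pvPairOp init).getD k 0
      = init.getD k 0 + (L.countP (fun p => p.1 == (k : Int)) : Int)
          - (L.countP (fun p => p.2 == (k : Int)) : Int) := by
  induction L generalizing init with
  | nil => simp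
  | cons p T ih =>
    obtain ⟨hp1, hp1l, hp2, hp2l⟩ := hL p (List.mem_cons_self)
    rw [List.foldl_cons,
      ih _ (fun q hq => by
        rw [pvPairOp_length _ _ hp1 hp2]
        exact hL q (List.mem_cons_of_mem _ hq)),
      pvPairOp_getD _ _ _ hp1 hp2 hp1l hp2l]
    simp only [List.countP_cons]
    by_cases e1 : p.1 = (k : Int) <;> by_cases e2 : p.2 = (k : Int) <;>
      simp [e1, e2] <;> omega

theorem pvFold_length (L : List (Int × Int)) (init : List Int)
    (hL : ∀ p ∈ L, 0 ≤ p.1 ∧ 0 ≤ p.2) :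
    (L.foldl pvPairOp init).length = init.length := by
  induction L generalizing init with
  | nil => rfl
  | cons p T ih =>
    obtain ⟨hp1, hp2⟩ := hL p (List.mem_cons_self)
    rw [List.foldl_cons, ih _ (fun q hq => hL q (List.mem_cons_of_mem _ hq)),
      pvPairOp_length _ _ hp1 hp2]

-- B's fold, pointwise: each positive cell of the set is written once with its final value
theorem pvWriteFold_length (S : List Int) (f : Int → Int) (init : List Int) :
    (S.foldl (fun sc v => if 1 ≤ v then PySem.List.pySetD sc v (f v) else sc) init).length
      = init.length := by
  induction S generalizing init with
  | nil => rfl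
  | cons v T ih =>
    rw [List.foldl_cons]
    by_cases hv : 1 ≤ v
    · rw [if_pos hv, ih, PySem.List.pySetD_of_nonneg _ _ (by omega)]; simp
    · rw [if_neg hv, ih]

theorem pvWriteFold_getD (S : List Int) (f : Int → Int) (init : List Int) (hnd : S.Nodup)
    (hlen : ∀ v ∈ S, 1 ≤ v → v < (init.length : Int)) (k : Nat) :
    (S.foldl (fun sc v => if 1 ≤ v then PySem.List.pySetD sc v (f v) else sc) init).getD k 0
      = if (k : Int) ∈ S ∧ 1 ≤ (k : Int) then f k else init.getD k 0 := by
  induction S generalizing init with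
  | nil => simp
  | cons v T ih =>
    have hndT := hnd.of_cons
    have hvT : v ∉ T := (List.nodup_cons.mp hnd).1
    rw [List.foldl_cons]
    by_cases hv : 1 ≤ v
    · rw [if_pos hv,
        ih _ hndT (fun w hw h1 => by
          rw [PySem.List.pySetD_of_nonneg _ _ (by omega : (0:Int) ≤ v), List.length_set]
          exact hlen w (List.mem_cons_of_mem _ hw) h1)]
      by_cases hkT : (k : Int) ∈ T ∧ 1 ≤ (k : Int)
      · simp [hkT, List.mem_cons_of_mem _ hkT.1]
      · rw [if_neg hkT, PySem.List.pySetD_of_nonneg _ _ (by omega : (0:Int) ≤ v)]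
        by_cases hkv : (k : Int) = v
        · have hk : v.toNat = k := by omega
          have hlt : k < init.length := by
            have := hlen v List.mem_cons_self hv; omega
          rw [if_pos ⟨by simp [← hkv], by omega⟩, ← hkv]
          simp [List.getD_eq_getElem?_getD, hlt]
        · have : v.toNat ≠ k := by omega
          rw [if_neg (by
            rintro ⟨hmem, hk1⟩
            rcases List.mem_cons.mp hmem with h | h
            · exact hkv h
            · exact hkT ⟨h, hk1⟩)]
          simp [List.getD_eq_getElem?_getD, this]
    · rw [if_neg hv, ih _ hndT (fun w hw h1 => hlen w (List.mem_cons_of_mem _ hw) h1)]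
      by_cases hkv : (k : Int) = v
      · rw [if_neg (by rintro ⟨_, hk1⟩; omega), if_neg (by rintro ⟨hm, hk1⟩; omega)]
      · by_cases hkT : (k : Int) ∈ T ∧ 1 ≤ (k : Int)
        · simp [hkT, List.mem_cons_of_mem _ hkT.1]
        · rw [if_neg hkT, if_neg (by
            rintro ⟨hmem, hk1⟩
            rcases List.mem_cons.mp hmem with h | h
            · exact hkv h
            · exact hkT ⟨h, hk1⟩)]

-- a sum of (if i = j then c i else 0) over a duplicate-free list picks out c j
theorem pvSumIndicator (S : List Int) (j : Int) (c : Int → Nat) (hnd : S.Nodup) :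
    (S.map (fun i => if i = j then c i else 0)).sum = if j ∈ S then c j else 0 := by
  induction S with
  | nil => simp
  | cons v T ih =>
    have hvT : v ∉ T := (List.nodup_cons.mp hnd).1
    rw [List.map_cons, List.sum_cons, ih hnd.of_cons]
    by_cases hvj : v = j
    · subst hvj
      simp [hvT]
    · simp [hvj, Ne.symm hvj, List.mem_cons]

-- a duplicate-free list counts an element 0 or 1 times
theorem pvCountPNodup (l : List Int) (j : Int) (hnd : l.Nodup) :
    l.countP (fun y => y == j) = if j ∈ l then 1 else 0 := by
  induction l with
  | nil => simp
  | cons v T ih =>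
    have hvT : v ∉ T := (List.nodup_cons.mp hnd).1
    rw [List.countP_cons, ih hnd.of_cons]
    by_cases hvj : v = j
    · subst hvj; simp [hvT]
    · simp [hvj, Ne.symm hvj, List.mem_cons]

-- #pairs crediting cell j  =  B's multiple count of j
theorem pvCountA1 (S : List Int) (m j : Int) (hnd : S.Nodup) (h0 : (0:Int) ∉ S)
    (hmS : ∀ x ∈ S, x ≤ m) :
    ((pvPairsA S m).countP (fun p => p.1 == j) : Int)
      = if j ∈ S ∧ 1 ≤ j then pvPlus S j else 0 := by
  rw [pvPairsA, List.countP_flatMap]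
  have hinner : ∀ i : Int,
      ((List.countP (fun p => p.1 == j)) ∘ fun i' => (((PySem.List.pyRange (i' * 2) (m + 1) i').filter
          (fun x => PySem.Set.contains S x)).map (fun j => (i', j)))) i
      = if i = j then ((PySem.List.pyRange (i * 2) (m + 1) i).filter
          (fun x => PySem.Set.contains S x)).length else 0 := by
    intro i
    simp only [Function.comp_apply]
    rw [List.countP_map]
    by_cases hij : i = j
    · simp [Function.comp_def, hij, List.countP_true]
    · simp [Function.comp_def, hij]
  rw [List.map_congr_left (fun i _ => hinner i), pvSumIndicator _ _ _ hnd]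
  by_cases hjS : j ∈ S
  · have hj0 : j ≠ 0 := fun h => h0 (h ▸ hjS)
    by_cases hj1 : 1 ≤ j
    · rw [if_pos hjS, if_pos ⟨hjS, hj1⟩, pvPlus]
      congr 1
      apply List.Perm.length_eq
      rw [List.perm_ext_iff_of_nodup ((pvRange_nodup _ _ _).filter _) (hnd.filter _)]
      intro y
      simp only [List.mem_filter, PySem.List.mem_pyRange_iff_of_pos (by omega : 0 < j),
        PySem.Set.contains_iff, Bool.and_eq_true, decide_eq_true_eq, beq_iff_eq,
        PySem.Int.mod_eq_zero_iff_dvd]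
      constructor
      · rintro ⟨⟨ha, hb, hc⟩, hyS⟩
        have : j ∣ (y - j * 2) + j * 2 := dvd_add hc ⟨2, rfl⟩
        refine ⟨hyS, by omega, by simpa using this⟩
      · rintro ⟨hyS, hlt, hdvd⟩
        obtain ⟨q, rfl⟩ := hdvd
        have hq : 2 ≤ q := by nlinarith
        refine ⟨⟨by nlinarith, by have := hmS _ hyS; omega, dvd_sub ⟨q, rfl⟩ ⟨2, rfl⟩⟩, hyS⟩
    · -- j ∈ S but j < 0: its range is empty, and the if is false
      rw [if_pos hjS, if_neg (by rintro ⟨_, h⟩; exact hj1 h),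
        pvRange_neg_nil _ _ _ (by omega) (by
          have := hmS _ hjS; omega)]
      simp
  · simp [hjS]

-- a 0/1 indicator sum over a list is a countP (Nat-valued; the Int form is PySem's sum_map_ite_one_zero)
theorem pvSumCount (S : List Int) (C : Int → Bool) :
    (S.map (fun i => if C i then (1 : Nat) else 0)).sum = S.countP C := by
  induction S with
  | nil => rfl
  | cons v T ih => rw [List.map_cons, List.sum_cons, ih, List.countP_cons]; split_ifs <;> omega

-- multiples-range membership, positive stride: j ∈ range(2i, m+1, i) ↔ i < j and i ∣ j
theorem pvMemMult (m i j : Int) (hjm : j ≤ m) (hi : 0 < i) :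
    j ∈ PySem.List.pyRange (i * 2) (m + 1) i ↔ i < j ∧ i ∣ j := by
  rw [PySem.List.mem_pyRange_iff_of_pos hi]
  constructor
  · rintro ⟨h1, h2, hc⟩
    have hd : i ∣ j := by have := dvd_add hc ⟨2, rfl⟩; simpa using this
    exact ⟨by omega, hd⟩
  · rintro ⟨hlt, ⟨q, rfl⟩⟩
    have hq : 2 ≤ q := by nlinarith
    exact ⟨by nlinarith, by omega, dvd_sub ⟨q, rfl⟩ ⟨2, rfl⟩⟩

-- negative stride: the multiples range is empty
theorem pvMemMultNeg (m i j : Int) (hm1 : 1 ≤ m) (hi : i < 0) :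
    j ∉ PySem.List.pyRange (i * 2) (m + 1) i := by
  rw [pvRange_neg_nil _ _ _ hi (by omega)]; simp

-- #pairs debiting cell j  =  B's proper-divisor count of j
theorem pvCountA2 (S : List Int) (m j : Int) (_hnd : S.Nodup) (h0 : (0:Int) ∉ S)
    (hmS : ∀ x ∈ S, x ≤ m) (hm1 : 1 ≤ m) :
    ((pvPairsA S m).countP (fun p => p.2 == j) : Int)
      = if j ∈ S ∧ 1 ≤ j then pvMinus S j else 0 := by
  rw [pvPairsA, List.countP_flatMap]
  have hinner : ∀ i : Int,
      ((List.countP (fun p => p.2 == j)) ∘ fun i' => (((PySem.List.pyRange (i' * 2) (m + 1) i').filter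
          (fun x => PySem.Set.contains S x)).map (fun j => (i', j)))) i
      = if (decide (j ∈ S) && decide (j ∈ PySem.List.pyRange (i * 2) (m + 1) i)) then 1 else 0 := by
    intro i
    simp only [Function.comp_apply]
    rw [List.countP_map]
    have he : ((fun p : Int × Int => p.2 == j) ∘ fun y => (i, y)) = fun y => y == j := rfl
    rw [he, pvCountPNodup _ _ ((pvRange_nodup _ _ _).filter _)]
    by_cases hjS : j ∈ S <;> by_cases hjr : j ∈ PySem.List.pyRange (i * 2) (m + 1) i <;>
      simp [hjS, hjr, List.mem_filter]
  rw [List.map_congr_left (fun i _ => hinner i), pvSumCount]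
  by_cases hjS : j ∈ S
  · have hj0 : j ≠ 0 := fun h => h0 (h ▸ hjS)
    by_cases hj1 : 1 ≤ j
    · rw [if_pos ⟨hjS, hj1⟩, pvMinus, ← List.countP_eq_length_filter]
      rw [Nat.cast_inj]
      apply List.countP_congr
      intro i hiS
      have hi0 : i ≠ 0 := fun h => h0 (h ▸ hiS)
      simp only [hjS, decide_true, Bool.true_and, Bool.and_eq_true, decide_eq_true_eq,
        beq_iff_eq, PySem.Int.mod_eq_zero_iff_dvd]
      rcases lt_or_gt_of_ne hi0 with hi | hi
      · constructor
        · intro h; exact absurd h (pvMemMultNeg m i j hm1 hi)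
        · rintro ⟨h1, _, _⟩; omega
      · rw [pvMemMult m i j (hmS j hjS) hi]
        constructor
        · rintro ⟨hlt, hd⟩; exact ⟨⟨by omega, hlt⟩, hd⟩
        · rintro ⟨⟨_, hlt⟩, hd⟩; exact ⟨hlt, hd⟩
    · -- j ∈ S but j < 0: j is in no positive value's multiples range
      rw [if_neg (by rintro ⟨_, h⟩; exact hj1 h), Nat.cast_eq_zero, List.countP_eq_zero]
      intro i hiS
      have hi0 : i ≠ 0 := fun h => h0 (h ▸ hiS)
      simp only [Bool.and_eq_true, decide_eq_true_eq, not_and]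
      intro _ hmem
      rcases lt_or_gt_of_ne hi0 with hi | hi
      · exact pvMemMultNeg m i j hm1 hi hmem
      · have := ((pvMemMult m i j (hmS j hjS) hi).mp hmem).1
        omega
  · rw [if_neg (by rintro ⟨h, _⟩; exact hjS h), Nat.cast_eq_zero, List.countP_eq_zero]
    intro i _
    simp [hjS]

set_option maxHeartbeats 1000000 in
theorem solve_eq_alt (N : Int) (num : List Int) (hpre : Pre_solve N num) :
    solve N num = solve_alt N num := by
  obtain ⟨hne, ⟨y, hyn, hy1⟩, hall⟩ := hpre
  have hymem : y ∈ PySem.Set.ofList num := (PySem.Set.mem_ofList num y).mpr hyn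
  obtain ⟨m, hmax⟩ : ∃ m, PySem.List.max? (PySem.Set.ofList num) (fun x => x) = some m := by
    cases h : PySem.List.max? (PySem.Set.ofList num) (fun x => x) with
    | none => exact absurd ((PySem.List.max?_eq_none_iff _ _).mp h ▸ hymem) (List.not_mem_nil)
    | some m => exact ⟨m, rfl⟩
  have hmS : ∀ x ∈ PySem.Set.ofList num, x ≤ m := PySem.List.max?_isMax hmax
  have hm1 : (1:Int) ≤ m := le_trans hy1 (hmS y hymem)
  have h0 : (0:Int) ∉ PySem.Set.ofList num := fun h =>
    (hall 0 ((PySem.Set.mem_ofList num 0).mp h)).1 rfl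
  have hnd := PySem.Set.nodup_ofList num
  have hlenrep : (List.replicate (m + 1).toNat (0:Int)).length = (m + 1).toNat :=
    List.length_replicate
  have hcast : (((m + 1).toNat : Nat) : Int) = m + 1 := Int.toNat_of_nonneg (by omega)
  simp only [solve, solve_alt, hmax, Option.getD_some]
  rw [pvFoldA]
  have hinit : (PySem.List.pyRange 0 (m + 1) 1).map (fun _ => (0:Int))
      = List.replicate (m + 1).toNat 0 := by
    rw [List.map_const', PySem.List.length_pyRange_one]
    norm_num
  rw [hinit]
  have hbounds : ∀ p ∈ pvPairsA (PySem.Set.ofList num) m,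
      0 ≤ p.1 ∧ p.1 < ((List.replicate (m + 1).toNat (0:Int)).length : Int)
        ∧ 0 ≤ p.2 ∧ p.2 < ((List.replicate (m + 1).toNat (0:Int)).length : Int) := by
    intro p hp
    rw [pvPairsA_mem _ _ h0 hm1] at hp
    obtain ⟨_, _, h3, h4, h5, _⟩ := hp
    rw [hlenrep, hcast]
    exact ⟨by omega, by omega, by omega, by omega⟩
  have hscore : (pvPairsA (PySem.Set.ofList num) m).foldl pvPairOp (List.replicate (m + 1).toNat 0)
      = (PySem.Set.ofList num).foldl (fun sc v =>
          if 1 ≤ v then PySem.List.pySetD sc v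
            (pvPlus (PySem.Set.ofList num) v - pvMinus (PySem.Set.ofList num) v)
          else sc) (List.replicate (m + 1).toNat 0) := by
    apply List.ext_getElem
    · rw [pvFold_length _ _ (fun p hp => ⟨(hbounds p hp).1, (hbounds p hp).2.2.1⟩),
        pvWriteFold_length]
    · intro k h1 h2
      have hrep : (List.replicate (m + 1).toNat (0:Int)).getD k 0 = 0 := by
        by_cases hk : k < (m + 1).toNat
        · rw [List.getD_replicate _ hk]
        · rw [List.getD_eq_getElem?_getD, List.getElem?_eq_none (by rw [hlenrep]; omega),
            Option.getD_none]
      rw [← List.getD_eq_getElem _ 0 h1, ← List.getD_eq_getElem _ 0 h2,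
        pvFold_getD _ _ hbounds k,
        pvWriteFold_getD _ _ _ hnd (fun v hv h1v => by
          rw [hlenrep, hcast]
          exact lt_of_le_of_lt (hmS v hv) (by omega)) k,
        pvCountA1 _ _ _ hnd h0 hmS, pvCountA2 _ _ _ hnd h0 hmS hm1, hrep]
      split_ifs <;> ring
  rw [hscore]

-- ===== VERDICT (by name: the statement is the Claim_ definition above) =====
theorem solve_spec : Claim_equal_solve := by
  intro N num _ hpre
  exact solve_eq_alt N num hpre
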